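-- pv_equiv track=rewrite | github.com/matthewfallan/rouls | struct_utils.py | get_structural_elements
-- ===== SOURCE A (Python) =====
-- def get_structural_elements(pairs):
--     """
--     Given an iterable of all pairs in a structure, find every structural
--     element, defined as a maximal set of contiguous bases such that every
--     base in the set lies between at least two bases that are paired
--     (including the outermost base pair). Informally, a structural element is
--     anything that protrudes from the main horizontal line of bases in VARNA.
--     params:
--     - pairs (set[tuple[int, int]]): set of all base pairs in the structure
--     returns:
--     - elements (dict[tuple[int, int], set[tuple[int, int]]]): dict where every
--       key is the bounds of the element (5', 3') and every value is the set of
--       pairs in the element.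
--     """
--     min_dist = 4
--     pairs_ordered = sorted(pairs)
--     bases_checked = set()
--     elements = list()
--     bound3p = None
--     for pair_input in pairs_ordered:
--         # Validate the base pair.
--         if len(pair_input) != 2:
--             raise ValueError("Each pair must have length 2.")
--         pair5p = min(pair_input)
--         pair3p = max(pair_input)
--         if pair5p <= 0:
--             raise ValueError("Base indexes must be positive.")
--         if pair3p - pair5p < min_dist:
--             raise ValueError(f"Paired bases cannot be <{min_dist} apart.")
--         if pair5p in bases_checked:
--             raise ValueError(f"Duplicate base: {pair5p}")
--         if pair3p in bases_checked:
--             raise ValueError(f"Duplicate base: {pair3p}")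
--         bases_checked.add(pair5p)
--         bases_checked.add(pair3p)
--         pair = (pair5p, pair3p)
--         # Add the pair to a new structural element if its 5' base lies after
--         # the 3'-most base of the current structural element.
--         if bound3p is None or pair5p > bound3p:
--             elements.append(list())
--         # Add the pair to the current structural element.
--         elements[-1].append(pair)
--         # Set the 3' bound of the element to the 3'-most base in the element.
--         # If there are no pseudoknots, it is the 3' base of the first pair.
--         # If there are, then it is the maximum value of all 3' bases.
--         if bound3p is None:
--             bound3p = pair3p
--         else:
--             bound3p = max(bound3p, pair3p)
--     # Determine the 5' and 3' bounds of each element.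
--     bounds = [(min([pair5p for pair5p, pair3p in element]),
--                max([pair3p for pair5p, pair3p in element]))
--                for element in elements]
--     # Assign the bounds to each element.
--     elements = dict(zip(bounds, elements))
--     return elements
-- ===== SOURCE B (Python) =====
-- def get_structural_elements(pairs):
--     """Array-based reformulation: one validation/normalization pass, then a
--     prefix-maximum array of 3' ends, element boundaries found as an index
--     comprehension over it, and elements read off as slices of the sorted list."""
--     min_dist = 4
--     seen = set()
--     norm = []
--     for pair_input in sorted(pairs):
--         if len(pair_input) != 2:
--             raise ValueError("Each pair must have length 2.")
--         pair5p = min(pair_input)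
--         pair3p = max(pair_input)
--         if pair5p <= 0:
--             raise ValueError("Base indexes must be positive.")
--         if pair3p - pair5p < min_dist:
--             raise ValueError(f"Paired bases cannot be <{min_dist} apart.")
--         if pair5p in seen:
--             raise ValueError(f"Duplicate base: {pair5p}")
--         if pair3p in seen:
--             raise ValueError(f"Duplicate base: {pair3p}")
--         seen.add(pair5p)
--         seen.add(pair3p)
--         norm.append((pair5p, pair3p))
--     # before[i] = greatest 3' end strictly before position i (0 if none; bases are positive)
--     before = []
--     run = 0
--     for _, pair3p in norm:
--         before.append(run)
--         run = max(run, pair3p)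
--     # a pair starts a new element exactly when its 5' base lies beyond every earlier 3' end
--     cuts = [i for i, ((pair5p, _), b) in enumerate(zip(norm, before)) if pair5p > b]
--     cuts.append(len(norm))
--     # each element is a slice between consecutive boundaries; its bounds are its extreme bases
--     return {(min(p5 for p5, _ in norm[s:e]), max(p3 for _, p3 in norm[s:e])): norm[s:e]
--             for s, e in zip(cuts, cuts[1:])}
-- ===== Notes on version B (the rewrite author's own statement) =====
-- stated objective: alternative
-- what changed: A grows nested element lists inside one stateful loop (elements[-1].append with a bound3p sentinel) and recomputes bounds afterwards with dict(zip(...)); B is an array formulation: it first normalizes/validates the sorted pairs, then builds a prefix-maximum array of 3' ends, derives the element boundaries as an index comprehension over that array, and reads each element off as a slice between consecutive boundaries.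
import Mathlib
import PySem

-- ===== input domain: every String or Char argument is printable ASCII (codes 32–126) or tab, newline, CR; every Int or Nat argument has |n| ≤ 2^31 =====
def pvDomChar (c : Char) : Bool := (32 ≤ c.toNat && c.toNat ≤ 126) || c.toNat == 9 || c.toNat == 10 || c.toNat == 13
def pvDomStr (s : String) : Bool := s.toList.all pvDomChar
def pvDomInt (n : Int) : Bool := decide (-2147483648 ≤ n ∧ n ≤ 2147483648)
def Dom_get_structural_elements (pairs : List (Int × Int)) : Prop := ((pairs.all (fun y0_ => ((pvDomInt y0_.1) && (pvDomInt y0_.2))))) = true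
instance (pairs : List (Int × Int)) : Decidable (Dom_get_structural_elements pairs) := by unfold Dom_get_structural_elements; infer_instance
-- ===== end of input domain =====

-- B replaces A's stateful grouping loop (elements[-1].append with a bound3p sentinel plus a
-- trailing bounds pass) by an array formulation: a normalization pass, a prefix-maximum array
-- of 3' ends, boundary indices as a comprehension over it, and elements read off as slices.

-- ===== PORT A =====

-- elements[-1].append(v); the [] case is unreachable in A (Python would raise IndexError there)
def pvAppendLast : List (List (Int × Int)) → (Int × Int) → List (List (Int × Int))
  | [], _ => []
  | [e], v => [e ++ [v]]
  | e :: e' :: rest, v => e :: pvAppendLast (e' :: rest) v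

-- Python dict assignment d[k] = v on an association list of ((k5, k3), v) triples:
-- overwrite in place, new keys append (exact Python dict semantics); shared by both ports
def pvDictInsert : List (Int × Int × List (Int × Int)) → Int × Int → List (Int × Int) →
    List (Int × Int × List (Int × Int))
  | [], k, v => [(k.1, k.2, v)]
  | (a, b, w) :: rest, k, v =>
      if a = k.1 ∧ b = k.2 then (a, b, v) :: rest else (a, b, w) :: pvDictInsert rest k v

-- (min([pair5p for …]), max([pair3p for …])); elements built by the loop are nonempty,
-- so the .getD 0 defaults (Python would raise on an empty list) are never taken
def pvA_bounds (e : List (Int × Int)) : Int × Int :=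
  ((PySem.List.min? (e.map Prod.fst) (fun x => x)).getD 0,
   (PySem.List.max? (e.map Prod.snd) (fun x => x)).getD 0)

-- the for-loop of A; none = ValueError (excluded by Pre_)
def pvA_loop : List (Int × Int) → PySem.Set Int → List (List (Int × Int)) → Option Int →
    Option (List (List (Int × Int)))
  | [], _, elements, _ => some elements
  | p :: rest, checked, elements, bound3p =>
    let p5 := min p.1 p.2
    let p3 := max p.1 p.2
    if p5 ≤ 0 then none
    else if p3 - p5 < 4 then none
    else if PySem.Set.contains checked p5 then none
    else if PySem.Set.contains checked p3 then none
    else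
      let checked2 := PySem.Set.add (PySem.Set.add checked p5) p3
      let elements2 := if (match bound3p with | none => true | some b => decide (b < p5))
        then elements ++ [[]] else elements
      let elements3 := pvAppendLast elements2 (p5, p3)
      let bound3p2 := match bound3p with | none => some p3 | some b => some (max b p3)
      pvA_loop rest checked2 elements3 bound3p2

def get_structural_elements (pairs : List (Int × Int)) : List (Int × Int × List (Int × Int)) :=
  match pvA_loop (PySem.List.sorted2 pairs Prod.fst Prod.snd) PySem.Set.empty [] none with
  | none => []   -- ValueError: outside Pre_
  | some elements =>
      let bounds := elements.map pvA_bounds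
      (bounds.zip elements).foldl (fun d kv => pvDictInsert d kv.1 kv.2) []

-- ===== PORT B =====

-- B's validation/normalization loop; none = ValueError (same checks, same order, as A)
def pvB_val : List (Int × Int) → PySem.Set Int → List (Int × Int) → Option (List (Int × Int))
  | [], _, norm => some norm
  | p :: rest, seen, norm =>
    let p5 := min p.1 p.2
    let p3 := max p.1 p.2
    if p5 ≤ 0 then none
    else if p3 - p5 < 4 then none
    else if PySem.Set.contains seen p5 then none
    else if PySem.Set.contains seen p3 then none
    else pvB_val rest (PySem.Set.add (PySem.Set.add seen p5) p3) (norm ++ [(p5, p3)])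

-- before[i] = greatest 3' end strictly before position i (run starts at 0)
def pvB_before : List (Int × Int) → Int → List Int
  | [], _ => []
  | p :: rest, run => run :: pvB_before rest (max run p.2)

-- cuts = [i for i, ((pair5p, _), b) in enumerate(zip(norm, before)) if pair5p > b] + [len(norm)]
def pvB_cuts (norm : List (Int × Int)) : List Int :=
  ((PySem.List.enumerate ((norm.zip (pvB_before norm 0))) 0).filter
      (fun ib => decide (ib.2.2 < ib.2.1.1))).map (fun ib => ib.1)
    ++ [(norm.length : Int)]

-- (min(p5 for …), max(p3 for …)) of a slice; slices are nonempty inside Pre_, so the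
-- .getD 0 defaults (Python would raise on an empty generator) are never taken
def pvB_key (chunk : List (Int × Int)) : Int × Int :=
  ((PySem.List.min? (chunk.map Prod.fst) (fun x => x)).getD 0,
   (PySem.List.max? (chunk.map Prod.snd) (fun x => x)).getD 0)

def get_structural_elements_alt (pairs : List (Int × Int)) : List (Int × Int × List (Int × Int)) :=
  match pvB_val (PySem.List.sorted2 pairs Prod.fst Prod.snd) PySem.Set.empty [] with
  | none => []   -- ValueError: outside Pre_
  | some norm =>
      let cuts := pvB_cuts norm
      -- {…: norm[s:e] for s, e in zip(cuts, cuts[1:])} (cuts[1:] = drop 1: cuts is nonempty)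
      ((cuts.zip (cuts.drop 1)).map (fun se => PySem.List.slice norm (some se.1) (some se.2))).foldl
        (fun d c => pvDictInsert d (pvB_key c) c) []

-- ===== PRECONDITION & SPEC =====
-- Pre_ excludes exactly the inputs on which A raises ValueError: a pair with a nonpositive
-- base, a pair whose bases are less than 4 apart, or a repeated base index.
def Pre_get_structural_elements (pairs : List (Int × Int)) : Prop :=
  (∀ p ∈ pairs, 0 < min p.1 p.2 ∧ 4 ≤ max p.1 p.2 - min p.1 p.2) ∧
  (pairs.flatMap (fun p => [p.1, p.2])).Nodup

instance (pairs : List (Int × Int)) : Decidable (Pre_get_structural_elements pairs) := by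
  unfold Pre_get_structural_elements; infer_instance

def pvWitness_get_structural_elements : (List (Int × Int)) := [(1, 10), (2, 8), (20, 30)]

def Spec_get_structural_elements (pairs : List (Int × Int)) (out : List (Int × Int × List (Int × Int))) : Prop := out = get_structural_elements_alt pairs
instance (pairs : List (Int × Int)) (out : List (Int × Int × List (Int × Int))) : Decidable (Spec_get_structural_elements pairs out) := by unfold Spec_get_structural_elements; infer_instance

-- ===== CLAIM (what is proved, stated in full; the proofs are below) =====
def Claim_equal_get_structural_elements : Prop := ∀ (pairs : List (Int × Int)), Dom_get_structural_elements pairs → Pre_get_structural_elements pairs → Spec_get_structural_elements pairs (get_structural_elements pairs)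

-- ===== LEMMAS AND PROOFS =====

-- A's grouping loop with the validation stripped out (consumes already-normalized pairs)
def pvGLoop : List (Int × Int) → List (List (Int × Int)) → Option Int → List (List (Int × Int))
  | [], els, _ => els
  | p :: rest, els, b =>
    let els2 := if (match b with | none => true | some x => decide (x < p.1)) then els ++ [[]] else els
    pvGLoop rest (pvAppendLast els2 p) (some (match b with | none => p.2 | some x => max x p.2))

-- the natural recursion grouping normalized pairs into chunks with a running 3' maximum
def pvChunksAux : List (Int × Int) → Int → List (Int × Int) → List (List (Int × Int))
  | [], _, cur => [cur]
  | p :: rest, run, cur =>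
    if run < p.1 then cur :: pvChunksAux rest (max run p.2) [p]
    else pvChunksAux rest (max run p.2) (cur ++ [p])

def pvChunks : List (Int × Int) → List (List (Int × Int))
  | [] => []
  | p :: rest => pvChunksAux rest p.2 [p]

-- start offsets of a chunk list
def pvStartsK : List (List (Int × Int)) → Nat → List Int
  | [], _ => []
  | c :: cs, k => (k : Int) :: pvStartsK cs (k + c.length)

-- starts of all chunks after the first (the first chunk opened before the list began)
def pvStarts1 : List (List (Int × Int)) → List Int
  | [] => []
  | c :: cs => pvStartsK cs c.length

-- B's cut comprehension, relative to an arbitrary running maximum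
def pvCutsRel (ns : List (Int × Int)) (run : Int) : List Int :=
  ((PySem.List.enumerate ((ns.zip (pvB_before ns run))) 0).filter
      (fun ib => decide (ib.2.2 < ib.2.1.1))).map (fun ib => ib.1)

theorem pvVal_acc (ps : List (Int × Int)) : ∀ seen acc,
    pvB_val ps seen acc = (pvB_val ps seen []).map (acc ++ ·) := by
  induction ps with
  | nil => intro seen acc; simp [pvB_val]
  | cons p rest ih =>
    intro seen acc
    simp only [pvB_val]
    split_ifs with h1 h2 h3 h4
    · rfl
    · rfl
    · rfl
    · rfl
    · simp only [List.nil_append]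
      rw [ih _ (acc ++ [(min p.1 p.2, max p.1 p.2)]), ih _ [(min p.1 p.2, max p.1 p.2)],
        Option.map_map]
      congr 1
      funext x
      simp

theorem pvGLoop_cons (p5 p3 : Int) (ns : List (Int × Int)) (els : List (List (Int × Int))) (b : Option Int) :
    pvGLoop ((p5, p3) :: ns) els b
      = pvGLoop ns
          (pvAppendLast (if (match b with | none => true | some x => decide (x < p5)) then els ++ [[]] else els) (p5, p3))
          (some (match b with | none => p3 | some x => max x p3)) := rfl

theorem pv_strip (ps : List (Int × Int)) : ∀ seen els b,
    pvA_loop ps seen els b = (pvB_val ps seen []).map (fun ns => pvGLoop ns els b) := by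
  induction ps with
  | nil => intro seen els b; simp [pvA_loop, pvB_val, pvGLoop]
  | cons p rest ih =>
    intro seen els b
    simp only [pvA_loop, pvB_val]
    split_ifs with h1 h2 h3 h4 h5
    · rfl
    · rfl
    · rfl
    · rfl
    · simp only [List.nil_append]
      rw [ih, pvVal_acc rest _ [(min p.1 p.2, max p.1 p.2)], Option.map_map]
      congr 1
      funext ns
      rw [Function.comp_apply, List.singleton_append, pvGLoop_cons, if_pos h5]
      cases b <;> rfl
    · simp only [List.nil_append]
      rw [ih, pvVal_acc rest _ [(min p.1 p.2, max p.1 p.2)], Option.map_map]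
      congr 1
      funext ns
      rw [Function.comp_apply, List.singleton_append, pvGLoop_cons, if_neg h5]
      cases b <;> rfl

theorem pvAppendLast_append (es : List (List (Int × Int))) (ps : List (Int × Int)) (v : Int × Int) :
    pvAppendLast (es ++ [ps]) v = es ++ [ps ++ [v]] := by
  induction es with
  | nil => rfl
  | cons e t ih =>
    cases t with
    | nil => simp [pvAppendLast]
    | cons e' t' => simpa [pvAppendLast] using ih

theorem pvGLoop_chunksAux (ns : List (Int × Int)) : ∀ els cur run,
    pvGLoop ns (els ++ [cur]) (some run) = els ++ pvChunksAux ns run cur := by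
  induction ns with
  | nil => intro els cur run; simp [pvGLoop, pvChunksAux]
  | cons p rest ih =>
    intro els cur run
    simp only [pvGLoop, pvChunksAux]
    by_cases h : run < p.1
    · rw [if_pos (by simpa using h), if_pos h]
      have h1 : pvAppendLast ((els ++ [cur]) ++ [[]]) p = (els ++ [cur]) ++ [[p]] := by
        simpa using pvAppendLast_append (els ++ [cur]) [] p
      rw [h1, ih (els ++ [cur]) [p] (max run p.2)]
      simp
    · rw [if_neg (by simpa using h), if_neg h]
      rw [pvAppendLast_append els cur p, ih els (cur ++ [p]) (max run p.2)]

theorem pvGLoop_chunks (ns : List (Int × Int)) :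
    pvGLoop ns [] none = pvChunks ns := by
  cases ns with
  | nil => rfl
  | cons p rest =>
    show pvGLoop rest (pvAppendLast ([] ++ [[]]) p) (some p.2) = pvChunksAux rest p.2 [p]
    have h1 : pvAppendLast ([] ++ [[]]) p = [] ++ [[p]] := by
      simpa using pvAppendLast_append [] [] p
    rw [h1, pvGLoop_chunksAux rest [] [p] p.2]
    simp

theorem pvChunksAux_flatten (ns : List (Int × Int)) : ∀ run cur,
    (pvChunksAux ns run cur).flatten = cur ++ ns := by
  induction ns with
  | nil => intro run cur; simp [pvChunksAux]
  | cons p rest ih =>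
    intro run cur
    simp only [pvChunksAux]
    by_cases h : run < p.1
    · rw [if_pos h]; simp [ih]
    · rw [if_neg h]; simp [ih]

theorem pvChunksAux_ne_nil (ns : List (Int × Int)) : ∀ run cur,
    pvChunksAux ns run cur ≠ [] := by
  induction ns with
  | nil => intro run cur; simp [pvChunksAux]
  | cons p rest ih =>
    intro run cur
    simp only [pvChunksAux]
    by_cases h : run < p.1
    · rw [if_pos h]; simp
    · rw [if_neg h]; exact ih _ _

theorem pvStartsK_shift (cs : List (List (Int × Int))) : ∀ k : Nat,
    pvStartsK cs k = (pvStartsK cs 0).map (· + (k : Int)) := by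
  induction cs with
  | nil => intro k; simp [pvStartsK]
  | cons c cs ih =>
    intro k
    simp only [pvStartsK, List.map_cons]
    rw [ih (k + c.length), ih (0 + c.length), List.map_map]
    congr 1
    · simp
    · congr 1
      funext x
      simp only [Function.comp_apply]
      push_cast
      ring

theorem pvEnumFilterMap_shift {α : Type} (xs : List α) (c : α → Bool) : ∀ s : Int,
    ((PySem.List.enumerate xs s).filter (fun ib => c ib.2)).map (fun ib => ib.1)
      = (((PySem.List.enumerate xs 0).filter (fun ib => c ib.2)).map (fun ib => ib.1)).map (· + s) := by
  induction xs with
  | nil => intro s; simp [PySem.List.enumerate_nil]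
  | cons x xs ih =>
    intro s
    rw [PySem.List.enumerate_cons, PySem.List.enumerate_cons]
    by_cases h : c x = true
    · rw [List.filter_cons_of_pos (by simpa using h), List.filter_cons_of_pos (by simpa using h)]
      simp only [List.map_cons]
      rw [ih (s + 1), ih (0 + 1)]
      simp only [List.map_map]
      congr 1
      · simp
      · congr 1
        funext t
        simp only [Function.comp_apply]
        ring
    · rw [List.filter_cons_of_neg (by simpa using h), List.filter_cons_of_neg (by simpa using h)]
      rw [ih (s + 1), ih (0 + 1)]
      simp only [List.map_map]
      congr 1
      funext t
      simp only [Function.comp_apply]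
      try ring

theorem pvCutsRel_cons (p : Int × Int) (rest : List (Int × Int)) (run : Int) :
    pvCutsRel (p :: rest) run
      = (if run < p.1 then [(0 : Int)] else []) ++ (pvCutsRel rest (max run p.2)).map (· + 1) := by
  have hs := pvEnumFilterMap_shift (rest.zip (pvB_before rest (max run p.2)))
      (fun q : (Int × Int) × Int => decide (q.2 < q.1.1)) (0 + 1)
  simp only [pvCutsRel, pvB_before, List.zip_cons_cons, PySem.List.enumerate_cons,
    List.filter_cons]
  by_cases h : run < p.1
  · rw [if_pos (by simpa using h), if_pos h]
    simp only [List.map_cons, List.singleton_append]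
    congr 1
  · rw [if_neg (by simpa using h), if_neg h]
    simp only [List.nil_append]
    simpa using hs

theorem pvK (ns : List (Int × Int)) : ∀ run cur,
    pvStarts1 (pvChunksAux ns run cur) = (pvCutsRel ns run).map (· + (cur.length : Int)) := by
  induction ns with
  | nil =>
    intro run cur
    simp [pvChunksAux, pvStarts1, pvStartsK, pvCutsRel, PySem.List.enumerate_nil]
  | cons p rest ih =>
    intro run cur
    rw [pvCutsRel_cons]
    by_cases h : run < p.1
    · simp only [pvChunksAux, if_pos h]
      obtain ⟨c1, cs, hA⟩ := List.exists_cons_of_ne_nil (pvChunksAux_ne_nil rest (max run p.2) [p])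
      have hIH := ih (max run p.2) [p]
      rw [hA] at hIH ⊢
      simp only [pvStarts1, pvStartsK] at hIH ⊢
      simp only [List.singleton_append, List.map_cons]
      congr 1
      · simp
      · have hstep : pvStartsK cs (cur.length + c1.length)
            = (pvStartsK cs c1.length).map (· + (cur.length : Int)) := by
          rw [pvStartsK_shift cs (cur.length + c1.length), pvStartsK_shift cs c1.length,
            List.map_map]
          congr 1
          funext x
          simp only [Function.comp_apply]
          push_cast
          ring
        rw [hstep, hIH]
        simp only [List.map_map]
        congr 1
    · simp only [pvChunksAux, if_neg h]
      rw [ih (max run p.2) (cur ++ [p])]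
      simp only [List.nil_append, List.map_map, List.length_append, List.length_cons,
        List.length_nil]
      congr 1
      funext x
      simp only [Function.comp_apply]
      push_cast
      ring

theorem pvCuts_top (ns : List (Int × Int)) (hpos : ∀ p ∈ ns, 0 < p.1 ∧ 0 < p.2) :
    pvCutsRel ns 0 = pvStartsK (pvChunks ns) 0 := by
  cases ns with
  | nil => simp [pvCutsRel, pvChunks, pvStartsK, PySem.List.enumerate_nil]
  | cons p rest =>
    have hp := hpos p (List.mem_cons_self)
    rw [pvCutsRel_cons, if_pos hp.1]
    have hmax : max (0 : Int) p.2 = p.2 := max_eq_right (le_of_lt hp.2)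
    rw [hmax]
    simp only [pvChunks]
    obtain ⟨c1, cs, hA⟩ := List.exists_cons_of_ne_nil (pvChunksAux_ne_nil rest p.2 [p])
    have hK := pvK rest p.2 [p]
    rw [hA] at hK ⊢
    simp only [pvStarts1] at hK
    simp only [pvStartsK, List.singleton_append]
    congr 1
    rw [Nat.zero_add, hK]
    congr 1

theorem pvSlices_of_starts (cs : List (List (Int × Int))) : ∀ pre : List (Int × Int),
    (((pvStartsK cs pre.length ++ [((pre.length + cs.flatten.length : Nat) : Int)]).zip
        ((pvStartsK cs pre.length ++ [((pre.length + cs.flatten.length : Nat) : Int)]).drop 1)).map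
      (fun se => PySem.List.slice (pre ++ cs.flatten) (some se.1) (some se.2))) = cs := by
  induction cs with
  | nil => intro pre; simp [pvStartsK]
  | cons c cs ih =>
    intro pre
    have hslice : PySem.List.slice (pre ++ (c ++ cs.flatten))
        (some (pre.length : Int)) (some ((pre.length + c.length : Nat) : Int)) = c := by
      rw [PySem.List.slice_natCast]
      have h1 : pre.length + c.length - pre.length = c.length := by omega
      rw [h1, List.drop_left, List.take_left]
    cases cs with
    | nil =>
      simp only [pvStartsK, List.flatten_cons, List.flatten_nil, List.append_nil,
        List.cons_append, List.nil_append, List.drop_succ_cons, List.drop_zero,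
        List.zip_cons_cons, List.zip_nil_right, List.map_cons, List.map_nil]
      have hslice2 : PySem.List.slice (pre ++ c) (some (pre.length : Int))
          (some ((pre.length + c.length : Nat) : Int)) = c := by
        rw [PySem.List.slice_natCast]
        have h1 : pre.length + c.length - pre.length = c.length := by omega
        rw [h1, List.drop_left, List.take_length]
      simpa using hslice2
    | cons c2 cs' =>
      have hIH := ih (pre ++ c)
      rw [List.length_append, List.append_assoc] at hIH
      simp only [List.flatten_cons] at hIH hslice ⊢
      simp only [pvStartsK, List.cons_append, List.drop_succ_cons, List.drop_zero,
        List.zip_cons_cons, List.map_cons] at hIH ⊢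
      simp only [List.length_append, ← Nat.add_assoc] at hIH ⊢
      rw [hslice, hIH]

theorem pvVal_pos (ps : List (Int × Int)) : ∀ seen acc ns,
    (∀ q ∈ acc, 0 < q.1 ∧ 0 < q.2) → pvB_val ps seen acc = some ns →
    ∀ q ∈ ns, 0 < q.1 ∧ 0 < q.2 := by
  induction ps with
  | nil =>
    intro seen acc ns hacc h
    simp only [pvB_val, Option.some.injEq] at h
    exact h ▸ hacc
  | cons p rest ih =>
    intro seen acc ns hacc h
    simp only [pvB_val] at h
    split_ifs at h with h1 h2 h3 h4
    refine ih _ _ _ ?_ h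
    intro q hq
    rcases List.mem_append.mp hq with hq | hq
    · exact hacc q hq
    · simp at hq
      subst hq
      constructor
      · simp only [lt_iff_not_ge]; intro hc; exact h1 (by omega)
      · have : (0:Int) < min p.1 p.2 := lt_iff_not_ge.mpr (fun hc => h1 (by omega))
        have := min_le_max (a := p.1) (b := p.2)
        omega

theorem pvZipSelf (l : List (List (Int × Int))) :
    (l.map pvA_bounds).zip l = l.map (fun e => (pvA_bounds e, e)) := by
  have h := List.zip_map' (f := pvA_bounds) (g := id) (l := l)
  simpa using h

theorem pvKeyEq : pvB_key = pvA_bounds := rfl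

-- ===== VERDICT (by name: the statement is the Claim_ definition above) =====
theorem get_structural_elements_spec : Claim_equal_get_structural_elements := by
  intro pairs _ _
  unfold Spec_get_structural_elements get_structural_elements get_structural_elements_alt
  rw [pv_strip]
  cases h : pvB_val (PySem.List.sorted2 pairs Prod.fst Prod.snd) PySem.Set.empty [] with
  | none => rfl
  | some ns =>
    simp only [Option.map_some, pvGLoop_chunks]
    have hpos : ∀ q ∈ ns, 0 < q.1 ∧ 0 < q.2 := pvVal_pos _ _ _ _ (by simp) h
    have hflat : (pvChunks ns).flatten = ns := by
      cases ns with
      | nil => rfl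
      | cons p rest => simpa using pvChunksAux_flatten rest p.2 [p]
    have hcuts : pvB_cuts ns = pvStartsK (pvChunks ns) 0 ++ [(ns.length : Int)] := by
      have h0 : pvB_cuts ns = pvCutsRel ns 0 ++ [(ns.length : Int)] := rfl
      rw [h0, pvCuts_top ns hpos]
    have hchunks : ((pvB_cuts ns).zip ((pvB_cuts ns).drop 1)).map
        (fun se => PySem.List.slice ns (some se.1) (some se.2)) = pvChunks ns := by
      have hG := pvSlices_of_starts (pvChunks ns) []
      simp only [List.length_nil, List.nil_append, Nat.zero_add] at hG
      rw [hflat] at hG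
      rw [hcuts]
      exact hG
    rw [hchunks, pvZipSelf, List.foldl_map, pvKeyEq]
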